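-- pv_equiv track=rewrite | github.com/dejbug/robin | new/berger.py | generate1
-- ===== SOURCE A (Python) =====
-- def run(playersCount, start = 1):
-- 	playersCount += playersCount % 2
-- 	for i in range(start - 1, playersCount - 1 + (start - 1)):
-- 		yield 1 + i % (playersCount - 1)
-- 	yield playersCount
--
-- def fold(row, index = 0):
-- 	assert len(row) % 2 == 0
-- 	half = len(row) // 2
-- 	left = row[:half]
-- 	right = row[half:]
-- 	if index % 2:
-- 		left[0], right[-1] = right[-1], left[0]
-- 	# return list(zip(left, reversed(right)))
-- 	return [[left[i], right[-(i+1)]] for i in range(half)]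
--
-- def generate1(playersCount):
-- 	playersCount += playersCount % 2
-- 	if playersCount < 1:
-- 		raise ValueError(f'players count must be >= 1')
--
-- 	columns = playersCount // 2
-- 	rows = playersCount - 1
--
-- 	table = []
--
-- 	row = list(run(playersCount))
-- 	for i in range(rows):
-- 		table.append(fold(row, i))
-- 		row = list(run(playersCount, row[columns]))
--
-- 	return table
-- ===== SOURCE B (Python) =====
-- def generate1(playersCount):
-- 	n = playersCount + playersCount % 2
-- 	if n < 1:
-- 		raise ValueError('players count must be >= 1')
-- 	m = n - 1
-- 	half = n // 2
-- 	table = []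
-- 	for r in range(m):
-- 		base = r * half
-- 		first = (base % m) + 1
-- 		pairs = [[n, first]] if r % 2 else [[first, n]]
-- 		pairs += [[(base + k) % m + 1, (base - k) % m + 1] for k in range(1, half)]
-- 		table.append(pairs)
-- 	return table
-- ===== Notes on version B (the rewrite author's own statement) =====
-- stated objective: simpler
-- what changed: B replaces A's stateful per-round pipeline (generator `run` re-seeded from the previous row, plus `fold` with list slicing and an in-place swap) by a stateless closed-form: every cell of the Berger table is computed directly from its round and column indices by one modular formula; Pre_ excludes non-positive player counts, on which A raises ValueError.
-- outside the precondition, e.g. on generate1(0): A raises ValueError, B raises ValueError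
import Mathlib
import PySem

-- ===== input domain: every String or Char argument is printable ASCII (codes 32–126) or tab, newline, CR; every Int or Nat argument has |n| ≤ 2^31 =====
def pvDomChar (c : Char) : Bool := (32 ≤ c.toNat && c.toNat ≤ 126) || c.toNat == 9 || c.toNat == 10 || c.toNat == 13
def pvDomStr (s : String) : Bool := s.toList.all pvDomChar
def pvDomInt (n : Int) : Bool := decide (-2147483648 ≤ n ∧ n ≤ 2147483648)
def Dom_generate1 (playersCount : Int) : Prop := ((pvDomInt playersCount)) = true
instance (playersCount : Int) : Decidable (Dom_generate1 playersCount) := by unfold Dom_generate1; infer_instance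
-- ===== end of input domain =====

-- B replaces A's stateful per-round row recomputation (generator `run` + slicing `fold`)
-- by a stateless closed-form: each Berger-table cell computed directly from its indices.


-- ===== PORT A =====
-- port of the generator `run` (materialised as list(run(...)))
def runList (playersCount start : Int) : List Int :=
  let pc := playersCount + PySem.Int.mod playersCount 2
  (PySem.List.pyRange (start - 1) (pc - 1 + (start - 1)) 1).map
    (fun i => 1 + PySem.Int.mod i (pc - 1)) ++ [pc]

-- port of `fold`
def foldRow (row : List Int) (index : Int) : List (List Int) :=
  let half : Int := PySem.Int.floordiv (PySem.List.len row) 2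
  let left := PySem.List.slice row none (some half)
  let right := PySem.List.slice row (some half) none
  let lr :=
    if PySem.Int.mod index 2 ≠ 0 then
      (PySem.List.pySetD left 0 (PySem.List.pyGetD right (-1) 0),
       PySem.List.pySetD right (-1) (PySem.List.pyGetD left 0 0))
    else (left, right)
  (PySem.List.pyRange 0 half 1).map
    (fun i => [PySem.List.pyGetD lr.1 i 0, PySem.List.pyGetD lr.2 (-(i + 1)) 0])

def generate1 (playersCount : Int) : List (List (List Int)) :=
  let pc := playersCount + PySem.Int.mod playersCount 2
  if pc < 1 then []  -- ValueError: excluded by Pre_generate1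
  else
    let columns := PySem.Int.floordiv pc 2
    let rows := pc - 1
    ((PySem.List.pyRange 0 rows 1).foldl
      (fun (st : List (List (List Int)) × List Int) i =>
        (st.1 ++ [foldRow st.2 i], runList pc (PySem.List.pyGetD st.2 columns 0)))
      ([], runList pc 1)).1

-- ===== PORT B =====
def generate1_alt (playersCount : Int) : List (List (List Int)) :=
  let n := playersCount + PySem.Int.mod playersCount 2
  if n < 1 then []  -- ValueError: excluded by Pre_generate1
  else
    let m := n - 1
    let half := PySem.Int.floordiv n 2
    (PySem.List.pyRange 0 m 1).map (fun r =>
      let base := r * half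
      let first := PySem.Int.mod base m + 1
      (if PySem.Int.mod r 2 ≠ 0 then [[n, first]] else [[first, n]])
      ++ (PySem.List.pyRange 1 half 1).map
          (fun k => [PySem.Int.mod (base + k) m + 1, PySem.Int.mod (base - k) m + 1]))

-- ===== PRECONDITION & SPEC =====
-- Pre_ excludes non-positive player counts, on which the Python A raises ValueError.
def Pre_generate1 (playersCount : Int) : Prop := 1 ≤ playersCount
instance (playersCount : Int) : Decidable (Pre_generate1 playersCount) := by unfold Pre_generate1; infer_instance
def pvWitness_generate1 : Int := (5)

def Spec_generate1 (playersCount : Int) (out : List (List (List Int))) : Prop := out = generate1_alt playersCount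
instance (playersCount : Int) (out : List (List (List Int))) : Decidable (Spec_generate1 playersCount out) := by unfold Spec_generate1; infer_instance

-- ===== CLAIM (what is proved, stated in full; the proofs are below) =====
def Claim_equal_generate1 : Prop := ∀ (playersCount : Int), Dom_generate1 playersCount → Pre_generate1 playersCount → Spec_generate1 playersCount (generate1 playersCount)

-- ===== LEMMAS AND PROOFS =====

lemma fold_eq (pc h : Int) (hh : 1 ≤ h) (hpc : pc = 2 * h)
    (cs : List Int) (hlen : (cs.length : Int) = pc - 1) (x i : Int) :
    foldRow (cs ++ [x]) i =
      (if PySem.Int.mod i 2 ≠ 0 then [x, PySem.List.pyGetD cs 0 0]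
       else [PySem.List.pyGetD cs 0 0, x])
      :: (PySem.List.pyRange 1 h 1).map
          (fun k => [PySem.List.pyGetD cs k 0, PySem.List.pyGetD cs (pc - 1 - k) 0]) := by
  subst hpc
  have hlen2 : PySem.List.len (cs ++ [x]) = 2 * h := by
    simp [PySem.List.len_eq]; omega
  have hdiv : PySem.Int.floordiv (2 * h) 2 = h := by
    rw [PySem.Int.floordiv_eq_ediv_of_pos (by omega)]; omega
  simp only [foldRow, hlen2, hdiv]
  have e1 : PySem.List.slice (cs ++ [x]) none (some h) = cs.take h.toNat := by
    rw [PySem.List.slice_to _ (by omega : (0:Int) ≤ h)]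
    exact List.take_append_of_le_length (by omega)
  have e2 : PySem.List.slice (cs ++ [x]) (some h) none = cs.drop h.toNat ++ [x] := by
    rw [PySem.List.slice_from _ (by omega : (0:Int) ≤ h)]
    exact List.drop_append_of_le_length (by omega)
  simp only [e1, e2]
  have htk : ∀ k : Int, 0 ≤ k → k < h → PySem.List.pyGetD (cs.take h.toNat) k 0 = PySem.List.pyGetD cs k 0 := by
    intro k hk0 hk1
    rw [PySem.List.pyGetD_eq_getElem _ _ hk0 (by rw [List.length_take]; omega),
        PySem.List.pyGetD_eq_getElem _ _ hk0 (by omega),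
        List.getElem_take]
  have hmid : ∀ k : Int, 1 ≤ k → k < h → ∀ v : Int,
      PySem.List.pyGetD (cs.drop h.toNat ++ [v]) (-(k + 1)) 0 = PySem.List.pyGetD cs (2 * h - 1 - k) 0 := by
    intro k hk0 hk1 v
    have hcast : -(k + 1) = -((k.toNat + 1 : Nat) : Int) := by push_cast; omega
    rw [hcast, PySem.List.pyGetD_neg_natCast _ _ _ (by omega) (by simp [List.length_drop]; omega)]
    rw [List.getElem_append_left (by simp [List.length_drop]; omega)]
    rw [List.getElem_drop]
    rw [PySem.List.pyGetD_eq_getElem _ _ (by omega) (by omega)]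
    congr 1
    simp [List.length_drop]
    omega
  rw [PySem.List.pyRange_one_cons (by omega : (0:Int) < h), List.map_cons]
  by_cases hodd : PySem.Int.mod i 2 ≠ 0
  · simp only [if_pos hodd]
    rw [PySem.List.pyGetD_neg_one_append_singleton]
    have hset : PySem.List.pySetD (cs.drop h.toNat ++ [x]) (-1) (PySem.List.pyGetD (cs.take h.toNat) 0 0)
        = cs.drop h.toNat ++ [PySem.List.pyGetD (cs.take h.toNat) 0 0] := by
      simp [PySem.List.pySetD, PySem.List.pySet?, PySem.List.pyIdx?]
    rw [hset, PySem.List.pySetD_of_nonneg _ _ (by omega)]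
    congr 1
    · norm_num
      refine ⟨?_, htk 0 (by omega) (by omega)⟩
      rw [PySem.List.pyGetD_eq_getElem _ _ (by omega) (by simp [List.length_take]; omega)]
      simp
    · apply List.map_congr_left
      intro k hk
      rw [PySem.List.mem_pyRange_one] at hk
      have l1 : PySem.List.pyGetD ((cs.take h.toNat).set (0:Int).toNat x) k 0 = PySem.List.pyGetD cs k 0 := by
        rw [PySem.List.pyGetD_eq_getElem _ _ (by omega) (by simp [List.length_set, List.length_take]; omega),
            List.getElem_set_ne (by omega), List.getElem_take,
            ← PySem.List.pyGetD_eq_getElem _ _ (by omega) (by omega)]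
      rw [l1, hmid k hk.1 hk.2]
  · simp only [if_neg hodd]
    congr 1
    · norm_num
      exact htk 0 (by omega) (by omega)
    · apply List.map_congr_left
      intro k hk
      rw [PySem.List.mem_pyRange_one] at hk
      rw [htk k (by omega) hk.2, hmid k hk.1 hk.2]

def circ (m c : Int) : List Int := (PySem.List.pyRange 0 m 1).map (fun j => 1 + (c + j) % m)

lemma circ_length (m c : Int) : (circ m c).length = m.toNat := by
  simp [circ, PySem.List.length_pyRange_one]

lemma circ_getElem (m c : Int) (j : Nat) (hj : j < (circ m c).length) :
    (circ m c)[j] = 1 + (c + (j : Int)) % m := by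
  have hj' : j < (PySem.List.pyRange 0 m 1).length := by
    simpa [circ] using hj
  simp [circ, PySem.List.getElem_pyRange_one]

lemma circ_congr (m c c' : Int) (h : c % m = c' % m) : circ m c = circ m c' := by
  unfold circ
  apply List.map_congr_left
  intro j _
  rw [Int.add_emod c, Int.add_emod c', h]

lemma run_eq (pc s : Int) (hm : 0 < pc - 1) (he : pc % 2 = 0) :
    runList pc s = circ (pc - 1) (s - 1) ++ [pc] := by
  simp only [runList]
  rw [PySem.Int.mod_eq_emod_of_pos (by omega : (0:Int) < 2), he, add_zero]
  congr 1
  apply List.ext_getElem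
  · simp [circ_length, PySem.List.length_pyRange_one]
  intro j hj hj2
  have hjm : j < (pc - 1).toNat := by
    simpa [PySem.List.length_pyRange_one] using hj
  rw [List.getElem_map, PySem.List.getElem_pyRange_one, circ_getElem _ _ _ hj2]
  rw [PySem.Int.mod_eq_emod_of_pos hm]

lemma circ_getD (m c k : Int) (hm : 0 < m) (hk0 : 0 ≤ k) (hk : k < m) :
    PySem.List.pyGetD (circ m c) k 0 = 1 + (c + k) % m := by
  rw [PySem.List.pyGetD_eq_getElem _ _ hk0 (by rw [circ_length]; omega),
      circ_getElem _ _ _ (by rw [circ_length]; omega)]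
  congr 2
  omega

lemma next_start (m c h pc : Int) (hm : 0 < m) (hpc : pc = m + 1) (he : pc % 2 = 0)
    (hh : 1 ≤ h) (hhm : h ≤ m) (hor : h < m ∨ m = 1) :
    runList pc (PySem.List.pyGetD (circ m c ++ [pc]) h 0) = circ m (c + h) ++ [pc] := by
  rcases hor with hlt | hone
  · have hget : PySem.List.pyGetD (circ m c ++ [pc]) h 0 = 1 + (c + h) % m := by
      rw [PySem.List.pyGetD_eq_getElem _ _ (by omega) (by simp [circ_length]; omega),
          List.getElem_append_left (by rw [circ_length]; omega),
          circ_getElem _ _ _ (by rw [circ_length]; omega)]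
      congr 2
      omega
    rw [hget, run_eq _ _ (by omega) he, show 1 + (c + h) % m - 1 = (c + h) % m by ring]
    rw [show pc - 1 = m by omega]
    rw [circ_congr m ((c + h) % m) (c + h) (Int.emod_emod_of_dvd _ dvd_rfl)]
  · have hget : PySem.List.pyGetD (circ m c ++ [pc]) h 0 = pc := by
      rw [PySem.List.pyGetD_eq_getElem _ _ (by omega) (by simp [circ_length]; omega),
          List.getElem_append_right (by rw [circ_length]; omega)]
      simp [circ_length]
    rw [hget, run_eq _ _ (by omega) he, show pc - 1 = m by omega]
    rw [circ_congr m m (c + h) (by rw [hone, Int.emod_one, Int.emod_one])]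

-- the closed-form row B computes for round r
def rowB (pc h m r : Int) : List (List Int) :=
  (if PySem.Int.mod r 2 ≠ 0 then [[pc, PySem.Int.mod (r * h) m + 1]]
   else [[PySem.Int.mod (r * h) m + 1, pc]])
  ++ (PySem.List.pyRange 1 h 1).map
      (fun k => [PySem.Int.mod (r * h + k) m + 1, PySem.Int.mod (r * h - k) m + 1])

lemma loop_eq (pc h : Int) (hh : 1 ≤ h) (hpc : pc = 2 * h) :
    ∀ (t : Nat) (a c : Int) (acc : List (List (List Int))),
    c % (pc - 1) = (a * h) % (pc - 1) →
    ((PySem.List.pyRange a (a + t) 1).foldl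
      (fun (st : List (List (List Int)) × List Int) i =>
        (st.1 ++ [foldRow st.2 i], runList pc (PySem.List.pyGetD st.2 h 0)))
      (acc, circ (pc - 1) c ++ [pc])).1
    = acc ++ (PySem.List.pyRange a (a + t) 1).map (rowB pc h (pc - 1)) := by
  intro t
  induction t with
  | zero =>
    intro a c acc _
    simp
  | succ t ih =>
    intro a c acc hc
    have hm : 0 < pc - 1 := by omega
    rw [PySem.List.pyRange_one_cons (by omega : a < a + (t + 1 : Nat))]
    simp only [List.foldl_cons, List.map_cons]
    rw [next_start (pc - 1) c h pc hm (by omega) (by omega) hh (by omega) (by omega)]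
    have hlen : ((circ (pc - 1) c).length : Int) = pc - 1 := by
      rw [circ_length]; omega
    have hrng : a + 1 + (t : Int) = a + ((t + 1 : Nat) : Int) := by push_cast; omega
    have key := ih (a + 1) (c + h) (acc ++ [foldRow (circ (pc - 1) c ++ [pc]) a])
      (by rw [show (a + 1) * h = a * h + h by ring, Int.add_emod c, Int.add_emod (a * h), hc])
    rw [hrng] at key
    rw [key, fold_eq pc h hh hpc _ hlen pc a]
    have hg : ∀ k : Int, 0 ≤ k → k < pc - 1 →
        PySem.List.pyGetD (circ (pc - 1) c) k 0 = 1 + PySem.Int.mod (a * h + k) (pc - 1) := by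
      intro k hk0 hk1
      rw [circ_getD _ _ _ hm hk0 hk1, PySem.Int.mod_eq_emod_of_pos hm,
          Int.add_emod c, Int.add_emod (a * h), hc]
    have hrow : ((if PySem.Int.mod a 2 ≠ 0 then [pc, PySem.List.pyGetD (circ (pc - 1) c) 0 0]
          else [PySem.List.pyGetD (circ (pc - 1) c) 0 0, pc])
        :: (PySem.List.pyRange 1 h 1).map
            (fun k => [PySem.List.pyGetD (circ (pc - 1) c) k 0,
                       PySem.List.pyGetD (circ (pc - 1) c) (pc - 1 - k) 0]))
        = rowB pc h (pc - 1) a := by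
      unfold rowB
      have h0 : PySem.List.pyGetD (circ (pc - 1) c) 0 0 = PySem.Int.mod (a * h) (pc - 1) + 1 := by
        rw [hg 0 le_rfl (by omega), add_zero]; ring
      rw [h0]
      have htl : (PySem.List.pyRange 1 h 1).map
            (fun k => [PySem.List.pyGetD (circ (pc - 1) c) k 0,
                       PySem.List.pyGetD (circ (pc - 1) c) (pc - 1 - k) 0])
          = (PySem.List.pyRange 1 h 1).map
            (fun k => [PySem.Int.mod (a * h + k) (pc - 1) + 1, PySem.Int.mod (a * h - k) (pc - 1) + 1]) := by
        apply List.map_congr_left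
        intro k hk
        rw [PySem.List.mem_pyRange_one] at hk
        rw [hg k (by omega) (by omega), hg (pc - 1 - k) (by omega) (by omega)]
        simp only [PySem.Int.mod_eq_emod_of_pos hm]
        rw [show a * h + (pc - 1 - k) = (a * h - k) + (pc - 1) * 1 by ring,
            Int.add_mul_emod_self_left]
        simp [add_comm]
      rw [htl]
      split_ifs <;> rfl
    rw [hrow]
    simp

-- ===== VERDICT (by name: the statement is the Claim_ definition above) =====
theorem generate1_spec : Claim_equal_generate1 := by
  intro p _ hpre
  unfold Spec_generate1
  have hpre' : (1:Int) ≤ p := hpre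
  have hm2 : PySem.Int.mod p 2 = p % 2 := PySem.Int.mod_eq_emod_of_pos (by omega)
  simp only [generate1, generate1_alt, hm2]
  set pc := p + p % 2 with hpcdef
  have h2 : 2 ≤ pc := by omega
  have he : pc % 2 = 0 := by omega
  rw [if_neg (by omega), if_neg (by omega)]
  have hdiv : PySem.Int.floordiv pc 2 = pc / 2 := PySem.Int.floordiv_eq_ediv_of_pos (by omega)
  simp only [hdiv]
  set h := pc / 2 with hhdef
  have hh1 : 1 ≤ h := by omega
  have hpch : pc = 2 * h := by omega
  rw [run_eq pc 1 (by omega) he, show (1:Int) - 1 = 0 by ring]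
  have key := loop_eq pc h hh1 hpch (pc - 1).toNat 0 0 [] (by ring_nf)
  rw [show (0:Int) + (((pc - 1).toNat : Nat) : Int) = pc - 1 by omega] at key
  rw [key, List.nil_append]
  apply List.map_congr_left
  intro r _
  unfold rowB
  rfl
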